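-- pv_equiv track=rewrite | github.com/GuillemGodayol/Ironhack_Data_Labs | Week_3/lab-refactoring/first code/game.py | comparing_rolls
-- ===== SOURCE A (Python) =====
-- def remove_max(rolls_list):
--     try:
--         rolls_list.remove(max(rolls_list))
--     except ValueError:
--         pass
--     return rolls_list
--
-- def comparing_rolls(def_rolls, att_rolls):
--     def_loses = 0
--     att_loses = 0
--     while len(def_rolls) > 0 and len(att_rolls) > 0:
--         if max(att_rolls) > max(def_rolls):
--             def_loses += 1
--         else:
--             att_loses += 1
--         att_rolls = remove_max(att_rolls)
--         def_rolls = remove_max(def_rolls)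
--     return(def_loses, att_loses)
-- ===== SOURCE B (Python) =====
-- def comparing_rolls(def_rolls, att_rolls):
--     # sort both descending once, then compare pairwise (A mutates its arguments; B does not)
--     ds = sorted(def_rolls, reverse=True)
--     ats = sorted(att_rolls, reverse=True)
--     def_loses = sum(1 for d, a in zip(ds, ats) if a > d)
--     att_loses = min(len(ds), len(ats)) - def_loses
--     return (def_loses, att_loses)
-- ===== Notes on version B (the rewrite author's own statement) =====
-- stated objective: faster
-- what changed: Replaced the repeated max-and-remove while loop with a single descending sort of both lists followed by one pairwise comparison pass.
import Mathlib
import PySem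

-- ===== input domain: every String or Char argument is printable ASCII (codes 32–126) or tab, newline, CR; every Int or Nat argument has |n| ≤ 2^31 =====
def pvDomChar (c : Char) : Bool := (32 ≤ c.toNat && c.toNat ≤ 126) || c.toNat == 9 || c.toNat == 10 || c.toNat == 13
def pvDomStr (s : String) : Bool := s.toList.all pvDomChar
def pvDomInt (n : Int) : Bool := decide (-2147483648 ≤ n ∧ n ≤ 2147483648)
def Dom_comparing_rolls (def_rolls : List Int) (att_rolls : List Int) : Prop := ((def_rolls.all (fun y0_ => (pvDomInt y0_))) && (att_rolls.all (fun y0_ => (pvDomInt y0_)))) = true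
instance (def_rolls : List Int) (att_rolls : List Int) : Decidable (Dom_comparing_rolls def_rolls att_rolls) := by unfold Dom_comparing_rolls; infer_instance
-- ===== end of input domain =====

-- B sorts both lists descending once and compares pairwise instead of A's repeated max-and-remove
-- loop; equivalence is about the return value only: Python A mutates both argument lists in place
-- (list.remove), B does not.

-- ===== PORT A =====

-- remove_max: rolls_list.remove(max(rolls_list)), ValueError caught and ignored
def removeMaxA (l : List Int) : List Int :=
  match PySem.List.max? l (fun x => x) with
  | none => l                 -- max([]) raises ValueError, caught: list returned unchanged
  | some m =>
    match PySem.List.remove? l m with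
    | none => l               -- ValueError from remove, caught (unreachable: m ∈ l)
    | some r => r

theorem removeMaxA_length_lt (l : List Int) (h : l ≠ []) :
    (removeMaxA l).length < l.length := by
  unfold removeMaxA
  cases hm : PySem.List.max? l (fun x => x) with
  | none => exact absurd ((PySem.List.max?_eq_none_iff l _).mp hm) h
  | some m =>
    have hmem : m ∈ l := PySem.List.max?_mem hm
    have hlen := List.length_erase_of_mem hmem
    have hpos : 0 < l.length := List.length_pos_of_mem hmem
    simp only [PySem.List.remove?_eq_some_erase l m hmem]
    omega

-- the while loop of comparing_rolls, state (def_rolls, att_rolls, def_loses, att_loses)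
def loopA (d a : List Int) (dl al : Int) : List Int :=
  if h : d.length > 0 ∧ a.length > 0 then
    match PySem.List.max? a (fun x => x), PySem.List.max? d (fun x => x) with
    | some ma, some md =>
      if ma > md then loopA (removeMaxA d) (removeMaxA a) (dl + 1) al
      else loopA (removeMaxA d) (removeMaxA a) dl (al + 1)
    | _, _ => [dl, al]        -- unreachable: both lists are nonempty here
  else [dl, al]
termination_by d.length
decreasing_by
  all_goals
    exact removeMaxA_length_lt d (List.ne_nil_of_length_pos h.1)

def comparing_rolls (def_rolls : List Int) (att_rolls : List Int) : List Int :=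
  loopA def_rolls att_rolls 0 0

-- ===== PORT B =====
def comparing_rolls_alt (def_rolls : List Int) (att_rolls : List Int) : List Int :=
  let ds := PySem.List.sorted def_rolls (fun x => x) true
  let ats := PySem.List.sorted att_rolls (fun x => x) true
  let def_loses : Int := ((ds.zip ats).countP (fun p => decide (p.2 > p.1)) : Int)
  let att_loses : Int := (min ds.length ats.length : Int) - def_loses
  [def_loses, att_loses]

-- ===== PRECONDITION & SPEC =====
def Spec_comparing_rolls (def_rolls : List Int) (att_rolls : List Int) (out : List Int) : Prop := out = comparing_rolls_alt def_rolls att_rolls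
instance (def_rolls : List Int) (att_rolls : List Int) (out : List Int) : Decidable (Spec_comparing_rolls def_rolls att_rolls out) := by unfold Spec_comparing_rolls; infer_instance

-- ===== CLAIM (what is proved, stated in full; the proofs are below) =====
def Claim_equal_comparing_rolls : Prop := ∀ (def_rolls : List Int) (att_rolls : List Int), Dom_comparing_rolls def_rolls att_rolls → Spec_comparing_rolls def_rolls att_rolls (comparing_rolls def_rolls att_rolls)

-- ===== LEMMAS AND PROOFS =====

-- the value returned by max? with key id is the multiset maximum, hence permutation-invariant
theorem max?_id_perm {l l' : List Int} (hp : l.Perm l') :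
    PySem.List.max? l (fun x => x) = PySem.List.max? l' (fun x => x) := by
  cases hm : PySem.List.max? l (fun x => x) with
  | none =>
    have : l = [] := (PySem.List.max?_eq_none_iff l _).mp hm
    subst this
    rw [(PySem.List.max?_eq_none_iff l' _).mpr hp.symm.eq_nil]
  | some m =>
    cases hm' : PySem.List.max? l' (fun x => x) with
    | none =>
      have : l' = [] := (PySem.List.max?_eq_none_iff l' _).mp hm'
      subst this
      have : l = [] := hp.eq_nil
      subst this
      rw [(PySem.List.max?_eq_none_iff ([] : List Int) _).mpr rfl] at hm
      exact hm.symm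
    | some m' =>
      have h1 : m ∈ l := PySem.List.max?_mem hm
      have h2 : m' ∈ l' := PySem.List.max?_mem hm'
      have hle1 : m ≤ m' := PySem.List.max?_isMax hm' m (hp.mem_iff.mp h1)
      have hle2 : m' ≤ m := PySem.List.max?_isMax hm m' (hp.mem_iff.mpr h2)
      exact congrArg some (le_antisymm hle1 hle2)

theorem removeMaxA_perm {l l' : List Int} (hp : l.Perm l') :
    (removeMaxA l).Perm (removeMaxA l') := by
  unfold removeMaxA
  rw [← max?_id_perm hp]
  cases hm : PySem.List.max? l (fun x => x) with
  | none => simpa using hp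
  | some m =>
    have h1 : m ∈ l := PySem.List.max?_mem hm
    have h2 : m ∈ l' := hp.mem_iff.mp h1
    simp only [PySem.List.remove?_eq_some_erase l m h1, PySem.List.remove?_eq_some_erase l' m h2]
    exact hp.erase m

-- loopA only looks at its lists through max? and erase-of-max, so it is permutation-invariant
theorem loopA_perm : ∀ (n : ℕ) (d d' a a' : List Int) (dl al : Int),
    d.length ≤ n → d.Perm d' → a.Perm a' → loopA d a dl al = loopA d' a' dl al := by
  intro n
  induction n with
  | zero =>
    intro d d' a a' dl al hn hd ha
    have hdnil : d = [] := List.eq_nil_of_length_eq_zero (Nat.le_zero.mp hn)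
    subst hdnil
    have hdnil' : d' = [] := hd.symm.eq_nil
    subst hdnil'
    rw [loopA]
    conv_rhs => rw [loopA]
    simp
  | succ n ih =>
    intro d d' a a' dl al hn hd ha
    rw [loopA]
    conv_rhs => rw [loopA]
    have hlen : d.length = d'.length := hd.length_eq
    have halen : a.length = a'.length := ha.length_eq
    by_cases h : d.length > 0 ∧ a.length > 0
    · have h' : d'.length > 0 ∧ a'.length > 0 := by omega
      rw [dif_pos h, dif_pos h']
      rw [← max?_id_perm ha, ← max?_id_perm hd]
      have hdne : d ≠ [] := List.ne_nil_of_length_pos h.1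
      have hlt : (removeMaxA d).length ≤ n := by
        have := removeMaxA_length_lt d hdne
        omega
      cases hma : PySem.List.max? a (fun x => x) with
      | none => rfl
      | some ma =>
        cases hmd : PySem.List.max? d (fun x => x) with
        | none => rfl
        | some md =>
          dsimp only
          by_cases hc : ma > md
          · rw [if_pos hc, if_pos hc]
            exact ih _ _ _ _ _ _ hlt (removeMaxA_perm hd) (removeMaxA_perm ha)
          · rw [if_neg hc, if_neg hc]
            exact ih _ _ _ _ _ _ hlt (removeMaxA_perm hd) (removeMaxA_perm ha)
    · have h' : ¬ (d'.length > 0 ∧ a'.length > 0) := by omega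
      rw [dif_neg h, dif_neg h']

theorem foldl_max_of_le (t : List Int) : ∀ x : Int, (∀ y ∈ t, y ≤ x) → t.foldl max x = x := by
  induction t with
  | nil => intro x _; rfl
  | cons y t ih =>
    intro x h
    simp only [List.foldl_cons]
    rw [max_eq_left (h y (by simp))]
    exact ih x (fun z hz => h z (by simp [hz]))

-- on a descending list the first max is the head and removing it is taking the tail
theorem max?_cons_of_pairwise {x : Int} {t : List Int}
    (h : ∀ y ∈ t, y ≤ x) : PySem.List.max? (x :: t) (fun y => y) = some x := by
  rw [PySem.List.max?_id_cons]
  rw [foldl_max_of_le t x h]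

theorem removeMaxA_cons_of_pairwise {x : Int} {t : List Int}
    (h : ∀ y ∈ t, y ≤ x) : removeMaxA (x :: t) = t := by
  unfold removeMaxA
  rw [max?_cons_of_pairwise h]
  simp only [PySem.List.remove?_cons_self]

-- on two descending lists the loop is exactly the pairwise comparison of B
theorem loopA_sorted : ∀ (ds ats : List Int) (dl al : Int),
    ds.Pairwise (fun p q => q ≤ p) → ats.Pairwise (fun p q => q ≤ p) →
    loopA ds ats dl al =
      [dl + ((ds.zip ats).countP (fun p => decide (p.2 > p.1)) : Int),
       al + ((min ds.length ats.length : Int) - ((ds.zip ats).countP (fun p => decide (p.2 > p.1)) : Int))] := by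
  intro ds
  induction ds with
  | nil => intro ats dl al _ _; rw [loopA]; simp
  | cons x dt ih =>
    intro ats dl al hd ha
    cases ats with
    | nil => rw [loopA]; simp; omega
    | cons y at_ =>
      rw [loopA]
      rw [dif_pos (by constructor <;> simp)]
      have hdt := (List.pairwise_cons.mp hd).2
      have hat := (List.pairwise_cons.mp ha).2
      have hdh := (List.pairwise_cons.mp hd).1
      have hah := (List.pairwise_cons.mp ha).1
      rw [max?_cons_of_pairwise hah, max?_cons_of_pairwise hdh]
      rw [removeMaxA_cons_of_pairwise hah, removeMaxA_cons_of_pairwise hdh]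
      dsimp only
      by_cases hc : y > x
      · rw [if_pos hc, ih at_ (dl + 1) al hdt hat]
        simp only [List.zip_cons_cons, List.countP_cons, hc, decide_true, List.length_cons,
          List.cons.injEq]
        refine ⟨by push_cast; omega, by push_cast; omega, trivial⟩
      · rw [if_neg hc, ih at_ dl (al + 1) hdt hat]
        simp only [List.zip_cons_cons, List.countP_cons, hc, decide_false, List.length_cons,
          List.cons.injEq]
        refine ⟨by push_cast; omega, by push_cast; omega, trivial⟩

-- ===== VERDICT (by name: the statement is the Claim_ definition above) =====
theorem comparing_rolls_spec : Claim_equal_comparing_rolls := by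
  intro d a _
  unfold Spec_comparing_rolls comparing_rolls comparing_rolls_alt
  have hd := PySem.List.sorted_perm d (fun x : Int => x) true
  have ha := PySem.List.sorted_perm a (fun x : Int => x) true
  rw [loopA_perm d.length d (PySem.List.sorted d (fun x => x) true) a
        (PySem.List.sorted a (fun x => x) true) 0 0 le_rfl hd.symm ha.symm]
  rw [loopA_sorted _ _ 0 0
        (PySem.List.sorted_pairwise_rev d (fun x : Int => x))
        (PySem.List.sorted_pairwise_rev a (fun x : Int => x))]
  simp
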